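-- pv_equiv track=rewrite | github.com/k-harada/AtCoder | ABC/ABC269/C.py | solve
-- ===== SOURCE A (Python) =====
-- from itertools import combinations
--
-- def solve(n):
--     i_list = []
--     for i in range(60):
--         if (n >> i) & 1:
--             i_list.append(i)
--     res = [0]
--     m = len(i_list)
--     for r in range(1, m + 1):
--         for p in combinations(i_list, r):
--             x = 0
--             for q in p:
--                 x += 2 ** q
--             res.append(x)
--     res = list(sorted(res))
--     return res
-- ===== SOURCE B (Python) =====
-- def solve(n):
--     # Subset-sum doubling over the set bits, ascending: since each new bit's
--     # power exceeds the sum of all lower set bits, the list stays sorted and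
--     # no final sort is needed.
--     res = [0]
--     for i in range(60):
--         if (n >> i) & 1:
--             res = res + [x + (1 << i) for x in res]
--     return res
-- ===== Notes on version B (the rewrite author's own statement) =====
-- stated objective: faster
-- what changed: A enumerates combinations of the set bits grouped by size and sorts the exponentially many subset sums at the end; B does a single subset-sum doubling pass over the set bits in ascending order, which emits the submasks already sorted, so the final sort and the per-combination summation loop disappear.
import Mathlib
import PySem

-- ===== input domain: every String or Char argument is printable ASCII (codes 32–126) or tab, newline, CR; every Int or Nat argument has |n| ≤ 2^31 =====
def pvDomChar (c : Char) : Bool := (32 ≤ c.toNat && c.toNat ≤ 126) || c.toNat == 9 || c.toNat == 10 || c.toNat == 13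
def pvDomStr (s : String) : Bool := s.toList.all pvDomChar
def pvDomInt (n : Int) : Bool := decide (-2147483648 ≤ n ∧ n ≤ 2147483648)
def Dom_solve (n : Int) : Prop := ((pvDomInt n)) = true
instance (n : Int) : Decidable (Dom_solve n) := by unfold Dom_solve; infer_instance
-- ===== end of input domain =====

-- B replaces A's size-grouped combinations enumeration plus final sort by a subset-sum
-- doubling pass over the set bits in ascending order, which produces the list already sorted.

-- ===== PORT A =====
-- '(n >> i) & 1' as an if-condition: arithmetic shift is floor division by 2^i, '& 1' is mod 2,
-- truthiness of the resulting int is '≠ 0'.  i comes from range(60) so i ≥ 0 and i.toNat is exact.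
def solveBit (n i : Int) : Bool := PySem.Int.mod (PySem.Int.floordiv n ((2 : Int) ^ i.toNat)) 2 != 0

def solve (n : Int) : List Int :=
  let iList := (PySem.List.pyRange 0 60 1).foldl
    (fun acc i => if solveBit n i then acc ++ [i] else acc) []
  let m : Int := iList.length
  -- r ranges over 1..m, so r ≥ 1 and r.toNat is exact; q ∈ iList ⊆ range(60), so 2 ** q = 2 ^ q.toNat
  let res := (PySem.List.pyRange 1 (m + 1) 1).foldl
    (fun acc r =>
      (PySem.List.combinations iList r.toNat).foldl
        (fun acc2 p => acc2 ++ [p.foldl (fun x q => x + (2 : Int) ^ q.toNat) 0]) acc)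
    [0]
  PySem.List.sorted res (fun x => x) false

-- ===== PORT B =====
-- same condition '(n >> i) & 1' as in A's source; '1 << i' with i ≥ 0 is 2 ^ i.toNat
def altBit (n i : Int) : Bool := PySem.Int.mod (PySem.Int.floordiv n ((2 : Int) ^ i.toNat)) 2 != 0

def solve_alt (n : Int) : List Int :=
  (PySem.List.pyRange 0 60 1).foldl
    (fun res i => if altBit n i then res ++ res.map (fun x => x + (2 : Int) ^ i.toNat) else res)
    [0]

-- ===== PRECONDITION & SPEC =====
def Spec_solve (n : Int) (out : List Int) : Prop := out = solve_alt n
instance (n : Int) (out : List Int) : Decidable (Spec_solve n out) := by unfold Spec_solve; infer_instance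

-- ===== CLAIM (what is proved, stated in full; the proofs are below) =====
def Claim_equal_solve : Prop := ∀ (n : Int), Dom_solve n → Spec_solve n (solve n)

-- ===== LEMMAS AND PROOFS =====

-- the doubling step of B, and B's loop over an arbitrary bit list
def pvStep (res : List Int) (i : Int) : List Int :=
  res ++ res.map (fun x => x + (2 : Int) ^ i.toNat)

def pvDbl (acc : List Int) (l : List Int) : List Int := l.foldl pvStep acc

-- A's inner sum over one combination
def pvSum (p : List Int) : Int := p.foldl (fun x q => x + (2 : Int) ^ q.toNat) 0

lemma pvSum_eq (p : List Int) : pvSum p = (p.map (fun q => (2 : Int) ^ q.toNat)).sum := by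
  simpa [pvSum] using PySem.List.foldl_add p (fun q : Int => (2 : Int) ^ q.toNat) 0

lemma pvSum_cons (i : Int) (p : List Int) :
    pvSum (i :: p) = (2 : Int) ^ i.toNat + pvSum p := by
  simp [pvSum_eq]

lemma pvFlatMap_append_perm {α β : Type} (acc : List α) (f g : α → List β) :
    (acc.flatMap fun a => f a ++ g a).Perm (acc.flatMap f ++ acc.flatMap g) := by
  induction acc with
  | nil => simp
  | cons a t ih =>
    simp only [List.flatMap_cons, List.append_assoc]
    refine List.Perm.append_left (f a) ?_
    refine (ih.append_left (g a)).trans ?_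
    have h2 : ∀ (u v w : List β), (u ++ (v ++ w)).Perm (v ++ (u ++ w)) := fun u v w => by
      simpa [List.append_assoc] using (List.perm_append_comm (l₁ := u) (l₂ := v)).append_right w
    exact h2 _ _ _

-- B's loop from a general accumulator, as a multiset
lemma pvDbl_coe (l : List Int) : ∀ acc : List Int,
    (↑(pvDbl acc l) : Multiset Int)
      = (acc : Multiset Int).bind (fun x => (↑(pvDbl [0] l) : Multiset Int).map (x + ·)) := by
  induction l with
  | nil =>
    intro acc
    show (↑acc : Multiset Int) = _
    rw [show (fun x : Int => (↑(pvDbl [0] [] : List Int) : Multiset Int).map (x + ·))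
        = fun x : Int => ({id x} : Multiset Int) from funext fun x => by simp [pvDbl]]
    rw [Multiset.bind_singleton, Multiset.map_id]
  | cons i t ih =>
    intro acc
    have hc : ∀ (ys : List Int), ((↑(ys ++ ys.map (fun x => x + (2:Int)^i.toNat)) : Multiset Int))
        = ↑ys + Multiset.map (fun x => x + (2:Int)^i.toNat) ↑ys := fun _ => rfl
    show (↑(pvDbl (pvStep acc i) t) : Multiset Int) = _
    rw [ih (pvStep acc i)]
    have h0 : (↑(pvDbl [0] (i :: t)) : Multiset Int)
        = (↑(pvStep [0] i) : Multiset Int).bind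
            (fun x => (↑(pvDbl [0] t) : Multiset Int).map (x + ·)) := ih (pvStep [0] i)
    rw [h0]
    simp only [pvStep]
    rw [hc acc, hc [0]]
    simp [Function.comp_def]
    rw [List.flatMap_map]
    rw [show (fun a : Int => List.map (fun x => a + 2 ^ i.toNat + x) (pvDbl [0] t))
        = fun a : Int => List.map (fun x => a + (2 ^ i.toNat + x)) (pvDbl [0] t) from
      funext fun a => by simp [add_assoc]]
    exact (pvFlatMap_append_perm acc _ _).symm

-- Multiset.map commutes with a finite sum of multisets
lemma pvMapSum (f : Int → Int) (s : Nat → Multiset Int) (n : Nat) :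
    Multiset.map f (∑ k ∈ Finset.range n, s k) = ∑ k ∈ Finset.range n, (s k).map f := by
  induction n with
  | zero => simp
  | succ n ih => simp [Finset.sum_range_succ, ih]

lemma pvRange_flatMap_coe (f : Nat → List Int) (n : Nat) :
    (↑((List.range n).flatMap f) : Multiset Int)
      = ∑ k ∈ Finset.range n, (↑(f k) : Multiset Int) := by
  induction n with
  | zero => simp
  | succ n ih => simp [List.range_succ, Finset.sum_range_succ, ← Multiset.coe_add, ih]

-- A's size-grouped enumeration is (as a multiset) B's doubling pass
lemma pvCombos (l : List Int) :
    (∑ k ∈ Finset.range (l.length + 1),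
        (↑((PySem.List.combinations l k).map pvSum) : Multiset Int))
      = ↑(pvDbl [0] l) := by
  induction l with
  | nil =>
    simp [PySem.List.combinations_zero, pvDbl, pvSum]
  | cons i t ih =>
    have hg1 : (↑((PySem.List.combinations t (t.length + 1)).map pvSum) : Multiset Int) = 0 := by
      rw [PySem.List.combinations_eq_nil_of_length_lt t (Nat.lt_succ_self _)]; rfl
    have hshift :
        (∑ k ∈ Finset.range (t.length + 1),
            (↑((PySem.List.combinations t (k + 1)).map pvSum) : Multiset Int)) + {(0 : Int)}
          = ↑(pvDbl [0] t) := by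
      have h2 := Finset.sum_range_succ'
        (fun k => (↑((PySem.List.combinations t k).map pvSum) : Multiset Int)) (t.length + 1)
      have h3 := Finset.sum_range_succ
        (fun k => (↑((PySem.List.combinations t k).map pvSum) : Multiset Int)) (t.length + 1)
      rw [h3, hg1, add_zero, ih] at h2
      simpa [PySem.List.combinations_zero, pvSum] using h2.symm
    have hstep : ∀ k : Nat,
        (↑((PySem.List.combinations (i :: t) (k + 1)).map pvSum) : Multiset Int)
          = Multiset.map (fun x => (2 : Int) ^ i.toNat + x)
              (↑((PySem.List.combinations t k).map pvSum))
            + ↑((PySem.List.combinations t (k + 1)).map pvSum) := by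
      intro k
      rw [PySem.List.combinations_cons_succ, List.map_append, ← Multiset.coe_add,
        List.map_map,
        show pvSum ∘ (fun c => i :: c) = (fun x => (2 : Int) ^ i.toNat + x) ∘ pvSum from
          funext fun c => pvSum_cons i c]
      rw [← List.map_map]
      rfl
    calc (∑ k ∈ Finset.range ((i :: t).length + 1),
            (↑((PySem.List.combinations (i :: t) k).map pvSum) : Multiset Int))
        = (∑ k ∈ Finset.range (t.length + 1),
            (↑((PySem.List.combinations (i :: t) (k + 1)).map pvSum) : Multiset Int))
            + ↑((PySem.List.combinations (i :: t) 0).map pvSum) := by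
          exact Finset.sum_range_succ'
            (fun k => (↑((PySem.List.combinations (i :: t) k).map pvSum) : Multiset Int))
            (t.length + 1)
      _ = Multiset.map (fun x => (2 : Int) ^ i.toNat + x) (↑(pvDbl [0] t))
            + ↑(pvDbl [0] t) := by
          rw [Finset.sum_congr rfl (fun k _ => hstep k), Finset.sum_add_distrib,
            ← pvMapSum, ih]
          rw [add_assoc]
          rw [show (↑((PySem.List.combinations (i :: t) 0).map pvSum) : Multiset Int)
              = {(0 : Int)} by simp [PySem.List.combinations_zero, pvSum]]
          rw [hshift]
      _ = ↑(pvDbl [0] (i :: t)) := by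
          have h0 : (↑(pvDbl [0] (i :: t)) : Multiset Int)
              = (↑(pvStep [0] i) : Multiset Int).bind
                  (fun x => (↑(pvDbl [0] t) : Multiset Int).map (x + ·)) := pvDbl_coe t _
          rw [h0]
          simp [pvStep, add_comm]

-- B's result is strictly increasing
lemma pvDbl_pairwise : ∀ (l : List Int), ∀ (acc : List Int) (c : Nat),
    (∀ x ∈ acc, 0 ≤ x ∧ x < (2 : Int) ^ c) → acc.Pairwise (· < ·) →
    l.Pairwise (· < ·) → (∀ i ∈ l, (c : Int) ≤ i) →
    (pvDbl acc l).Pairwise (· < ·) := by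
  intro l
  induction l with
  | nil => intro acc c _ hpw _ _; exact hpw
  | cons i t ih =>
    intro acc c hbd hpw hl hlo
    have hci : (c : Int) ≤ i := hlo i List.mem_cons_self
    have hi0 : (0 : Int) ≤ i := le_trans (by positivity) hci
    have hcn : c ≤ i.toNat := by omega
    have hpow : (2 : Int) ^ c ≤ (2 : Int) ^ i.toNat :=
      pow_le_pow_right₀ (by norm_num) hcn
    have hbd' : ∀ x ∈ pvStep acc i, 0 ≤ x ∧ x < (2 : Int) ^ (i.toNat + 1) := by
      intro x hx
      rcases List.mem_append.mp hx with hx | hx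
      · obtain ⟨h1, h2⟩ := hbd x hx
        constructor
        · exact h1
        · calc x < (2 : Int) ^ c := h2
            _ ≤ (2 : Int) ^ i.toNat := hpow
            _ < (2 : Int) ^ (i.toNat + 1) := by
                rw [pow_succ]; nlinarith [pow_pos (show (0:Int) < 2 by norm_num) i.toNat]
      · obtain ⟨y, hy, rfl⟩ := List.mem_map.mp hx
        obtain ⟨h1, h2⟩ := hbd y hy
        constructor
        · positivity
        · rw [pow_succ]
          have : y < (2 : Int) ^ i.toNat := lt_of_lt_of_le h2 hpow
          nlinarith
    have hpw' : (pvStep acc i).Pairwise (· < ·) := by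
      rw [pvStep, List.pairwise_append]
      refine ⟨hpw, ?_, ?_⟩
      · exact hpw.map _ (fun a b hab => by simpa using hab)
      · intro x hx y hy
        obtain ⟨z, hz, rfl⟩ := List.mem_map.mp hy
        obtain ⟨hx1, hx2⟩ := hbd x hx
        obtain ⟨hz1, _⟩ := hbd z hz
        calc x < (2 : Int) ^ c := hx2
          _ ≤ (2 : Int) ^ i.toNat := hpow
          _ ≤ z + (2 : Int) ^ i.toNat := by linarith
    have hlo' : ∀ j ∈ t, ((i.toNat + 1 : Nat) : Int) ≤ j := by
      intro j hj
      have := (List.pairwise_cons.mp hl).1 j hj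
      omega
    exact ih (pvStep acc i) (i.toNat + 1) hbd' hpw' (List.pairwise_cons.mp hl).2 hlo'

-- ===== VERDICT (by name: the statement is the Claim_ definition above) =====
theorem solve_spec : Claim_equal_solve := by
  intro n _
  show solve n = solve_alt n
  -- the common bit list
  have hbits : solveBit n = altBit n := rfl
  set l : List Int := (PySem.List.pyRange 0 60 1).filter (altBit n) with hl
  -- B's port is the doubling pass over l
  have hB : solve_alt n = pvDbl [0] l := by
    show (PySem.List.pyRange 0 60 1).foldl
        (fun res i => if altBit n i then pvStep res i else res) [0] = pvDbl [0] l
    rw [PySem.List.foldl_if_eq_foldl_filter]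
    rfl
  -- A's port, lets inlined and loops rewritten
  have hIL : (PySem.List.pyRange 0 60 1).foldl
      (fun acc i => if solveBit n i then acc ++ [i] else acc) [] = l := by
    rw [PySem.List.foldl_append_if_eq_filter, hbits]
    rfl
  have hA : solve n = PySem.List.sorted
      ([0] ++ (PySem.List.pyRange 1 ((l.length : Int) + 1) 1).flatMap
        (fun r => (PySem.List.combinations l r.toNat).map pvSum)) (fun x => x) false := by
    simp only [solve, hIL]
    simp only [show (fun (acc2 : List Int) (p : List Int) =>
        acc2 ++ [p.foldl (fun x q => x + (2 : Int) ^ q.toNat) 0])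
      = fun acc2 p => acc2 ++ [pvSum p] from rfl]
    simp only [PySem.List.foldl_append_singleton_eq_map]
    rw [PySem.List.foldl_append_eq_flatMap
      (fun r : Int => (PySem.List.combinations l r.toNat).map pvSum)]
  rw [hA, hB]
  -- the multiset of A's pre-sort list equals B's list
  have hperm : (pvDbl [0] l).Perm
      ([0] ++ (PySem.List.pyRange 1 ((l.length : Int) + 1) 1).flatMap
        (fun r => (PySem.List.combinations l r.toNat).map pvSum)) := by
    rw [← Multiset.coe_eq_coe]
    have hrange : PySem.List.pyRange 1 ((l.length : Int) + 1) 1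
        = (List.range l.length).map (fun k : Nat => (1 : Int) + k) := by
      rw [PySem.List.pyRange_one]
      simp
    rw [hrange, List.flatMap_map]
    have htn : ∀ k : Nat, ((1 : Int) + k).toNat = k + 1 := by intro k; omega
    simp only [htn]
    have hsplit := Finset.sum_range_succ'
      (fun k => (↑((PySem.List.combinations l k).map pvSum) : Multiset Int)) l.length
    rw [pvCombos] at hsplit
    rw [show (([0] ++ (List.range l.length).flatMap
          (fun k => (PySem.List.combinations l (k + 1)).map pvSum)) : List Int)
        = ((0 : Int) :: (List.range l.length).flatMap
          (fun k => (PySem.List.combinations l (k + 1)).map pvSum) : List Int) from rfl]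
    rw [← Multiset.cons_coe, pvRange_flatMap_coe]
    have h00 : (↑((PySem.List.combinations l 0).map pvSum) : Multiset Int) = {(0 : Int)} := by
      simp [PySem.List.combinations_zero, pvSum]
    rw [hsplit, h00, add_comm, Multiset.singleton_add]
  -- B's list is strictly increasing
  have hpw : (pvDbl [0] l).Pairwise (· < ·) := by
    refine pvDbl_pairwise l [0] 0 ?_ ?_ ?_ ?_
    · intro x hx; simp at hx; subst hx; norm_num
    · simp
    · exact (PySem.List.pairwise_lt_pyRange_one 0 60).filter _
    · intro i hi
      have := (PySem.List.mem_pyRange_one.mp (List.mem_of_mem_filter hi)).1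
      simpa using this
  exact PySem.List.sorted_eq_of_perm_of_pairwise_lt _ _ _ hperm hpw
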